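-- pv_equiv track=rewrite | github.com/povilaskarvelis/ai-co-scientist | adk-agent/ui_server.py | _strip_next_steps_section
-- ===== SOURCE A (Python) =====
-- def _strip_next_steps_section(markdown: str) -> str:
--     """Remove the Next Steps / Potential Next Steps heading and its content."""
--     lines = str(markdown or "").split("\n")
--     out: list[str] = []
--     skipping = False
--     for line in lines:
--         stripped = line.strip()
--         lowered = stripped.lower()
--         if stripped.startswith("#") and ("next step" in lowered or "potential next" in lowered):
--             skipping = True
--             continue
--         if skipping:
--             if stripped.startswith("#"):
--                 skipping = False
--             else:
--                 continue
--         out.append(line)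
--     return "\n".join(out).rstrip()
-- ===== SOURCE B (Python) =====
-- def _strip_next_steps_section(markdown: str) -> str:
--     """Remove the Next Steps / Potential Next Steps heading and its content."""
--     text = str(markdown or "")
--     sections = [[]]
--     for line in text.split("\n"):
--         if line.strip().startswith("#"):
--             sections.append([line])
--         else:
--             sections[-1].append(line)
--     kept = []
--     for sec in sections:
--         if sec:
--             head = sec[0].strip()
--             low = head.lower()
--             if head.startswith("#") and ("next step" in low or "potential next" in low):
--                 continue
--         kept.extend(sec)
--     return "\n".join(kept).rstrip()
-- ===== Notes on version B (the rewrite author's own statement) =====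
-- stated objective: alternative
-- what changed: Replaces A's stateful skipping-flag loop with a two-phase decomposition: first group the lines into heading-delimited sections, then keep every section whose heading is not a Next-Steps heading and flatten.
import Mathlib
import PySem

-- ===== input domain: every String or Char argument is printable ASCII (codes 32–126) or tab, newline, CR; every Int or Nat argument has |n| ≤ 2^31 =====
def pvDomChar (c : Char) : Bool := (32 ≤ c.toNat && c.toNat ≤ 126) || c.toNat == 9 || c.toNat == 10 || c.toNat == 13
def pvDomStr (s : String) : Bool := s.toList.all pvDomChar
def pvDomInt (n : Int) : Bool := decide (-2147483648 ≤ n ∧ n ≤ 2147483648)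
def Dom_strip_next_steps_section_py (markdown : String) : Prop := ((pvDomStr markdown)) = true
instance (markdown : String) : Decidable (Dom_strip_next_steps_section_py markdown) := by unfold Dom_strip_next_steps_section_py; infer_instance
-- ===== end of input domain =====

-- B regroups the lines into heading-delimited sections and drops the Next-Steps sections whole;
-- same return value as A's skipping-flag loop (objective: alternative decomposition, same cost).

-- ===== PORT A =====
-- A's for-loop over lines with accumulator `out` and flag `skipping`
def pvA_loop : List String → List String → Bool → List String
  | [], out, _ => out
  | line :: rest, out, skipping =>
    let stripped := PySem.Str.strip line
    let lowered := PySem.Str.lower stripped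
    if PySem.Str.startswith stripped "#" &&
        (PySem.Str.isIn "next step" lowered || PySem.Str.isIn "potential next" lowered) then
      pvA_loop rest out true
    else if skipping then
      if PySem.Str.startswith stripped "#" then pvA_loop rest (out ++ [line]) false
      else pvA_loop rest out skipping
    else pvA_loop rest (out ++ [line]) skipping

def strip_next_steps_section_py (markdown : String) : String :=
  -- str(markdown or "") = markdown for a str argument (exact: '' or '' == '')
  let lines := (PySem.Str.split? markdown "\n").getD []  -- sep = "\n" ≠ "", so split? = some (Python never raises here)
  PySem.Str.rstrip (PySem.Str.join "\n" (pvA_loop lines [] false))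

-- ===== PORT B =====
def pvB_isHash (line : String) : Bool := PySem.Str.startswith (PySem.Str.strip line) "#"

-- phase 1: group lines into sections, a new section at every '#' line
def pvB_group : List String → List String → List (List String)
  | [], current => [current]
  | line :: rest, current =>
    if pvB_isHash line then current :: pvB_group rest [line]
    else pvB_group rest (current ++ [line])

-- a section is dropped iff its first line is a Next-Steps heading
def pvB_drop (sec : List String) : Bool :=
  match sec with
  | [] => false
  | l :: _ =>
    let head := PySem.Str.strip l
    let low := PySem.Str.lower head
    PySem.Str.startswith head "#" &&
      (PySem.Str.isIn "next step" low || PySem.Str.isIn "potential next" low)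

def strip_next_steps_section_py_alt (markdown : String) : String :=
  let lines := (PySem.Str.split? markdown "\n").getD []  -- sep = "\n" ≠ "", so split? = some
  let secs := pvB_group lines []
  PySem.Str.rstrip (PySem.Str.join "\n" ((secs.filter (fun s => !pvB_drop s)).flatten))

-- ===== PRECONDITION & SPEC =====
def Spec_strip_next_steps_section_py (markdown : String) (out : String) : Prop := out = strip_next_steps_section_py_alt markdown
instance (markdown : String) (out : String) : Decidable (Spec_strip_next_steps_section_py markdown out) := by unfold Spec_strip_next_steps_section_py; infer_instance

-- ===== CLAIM (what is proved, stated in full; the proofs are below) =====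
def Claim_equal_strip_next_steps_section_py : Prop := ∀ (markdown : String), Dom_strip_next_steps_section_py markdown → Spec_strip_next_steps_section_py markdown (strip_next_steps_section_py markdown)

-- ===== LEMMAS AND PROOFS =====

-- appending a non-'#' line to a section does not change whether it is dropped
lemma pvDrop_append (c : List String) (l : String) (h : pvB_isHash l = false) :
    pvB_drop (c ++ [l]) = pvB_drop c := by
  cases c with
  | nil => simp [pvB_drop, pvB_isHash] at h ⊢; simp [h]
  | cons x xs => simp [pvB_drop]

-- A's loop state corresponds to B's pending section: if the pending section is kept its
-- lines are already in A's accumulator and skipping = false, otherwise skipping = true.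
lemma pvMain (rest : List String) : ∀ (current out : List String),
    (pvB_drop current = false →
      pvA_loop rest (out ++ current) false
        = out ++ (((pvB_group rest current).filter (fun s => !pvB_drop s)).flatten))
    ∧ (pvB_drop current = true →
      pvA_loop rest out true
        = out ++ (((pvB_group rest current).filter (fun s => !pvB_drop s)).flatten)) := by
  induction rest with
  | nil =>
    intro current out
    constructor
    · intro h; simp [pvA_loop, pvB_group, h]
    · intro h; simp [pvA_loop, pvB_group, h]
  | cons line rest ih =>
    intro current out
    by_cases hm : pvB_drop [line] = true
    · -- a matching Next-Steps heading line: A sets skipping, B starts a dropped section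
      have hh : pvB_isHash line = true := by
        simp [pvB_drop, pvB_isHash] at hm ⊢; exact hm.1
      constructor
      · intro h
        have := (ih [line] (out ++ current)).2 hm
        simp [pvA_loop, pvB_group, hh, h]
        simp [pvB_drop] at hm
        simp [hm, this]
      · intro h
        have := (ih [line] out).2 hm
        simp [pvA_loop, pvB_group, hh, h]
        simp [pvB_drop] at hm
        simp [hm, this]
    · have hm' : pvB_drop [line] = false := by simpa using hm
      by_cases hh : pvB_isHash line = true
      · -- a non-matching '#' line: B starts a kept section; A stops skipping and appends
        constructor
        · intro h
          have := (ih [line] (out ++ current)).1 hm'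
          simp [pvB_drop, pvB_isHash] at hm' hh
          simp [pvA_loop, pvB_group, pvB_isHash, hh, hm', h] at this ⊢
          simp [this]
        · intro h
          have := (ih [line] out).1 hm'
          simp [pvB_drop, pvB_isHash] at hm' hh
          simp [pvA_loop, pvB_group, pvB_isHash, hh, hm', h] at this ⊢
          simp [this]
      · -- an ordinary line: it joins the pending section on both sides
        have hh' : pvB_isHash line = false := by simpa using hh
        have hcond : pvB_drop (current ++ [line]) = pvB_drop current := pvDrop_append current line hh'
        have hA : PySem.Chars.startswith (PySem.Chars.strip line.toList) ['#'] = false := by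
          simpa [pvB_isHash] using hh'
        constructor
        · intro h
          have := (ih (current ++ [line]) out).1 (by rw [hcond]; exact h)
          simp [pvA_loop, pvB_group, pvB_isHash, hA] at this ⊢
          simpa [List.append_assoc] using this
        · intro h
          have := (ih (current ++ [line]) out).2 (by rw [hcond]; exact h)
          simp [pvA_loop, pvB_group, pvB_isHash, hA] at this ⊢
          exact this

-- ===== VERDICT (by name: the statement is the Claim_ definition above) =====
theorem strip_next_steps_section_py_spec : Claim_equal_strip_next_steps_section_py := by
  intro markdown _
  unfold Spec_strip_next_steps_section_py strip_next_steps_section_py strip_next_steps_section_py_alt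
  have := (pvMain ((PySem.Str.split? markdown "\n").getD []) [] []).1 (by simp [pvB_drop])
  simp at this
  simp [this]
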